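-- pv_equiv track=rewrite | github.com/cspyo/python-for-coding-test | Binary_search/chapter15/Q30.py | solution
-- ===== SOURCE A (Python) =====
-- from bisect import bisect_left, bisect_right
--
-- def solution(words, queries):
--     # 리스트 생성
--     data_div_len=[[] for _ in range(10001)]
--     data_div_len_rev = [[] for _ in range(10001)]
--     for w in words:
--         data_div_len[len(w)].append(w)
--         data_div_len_rev[len(w)].append(w[::-1])
--
--     # 이진 탐색 위한 리스트 정렬
--     for i in range(10001):
--         data_div_len[i].sort()
--         data_div_len_rev[i].sort()
--
--     result=[]
--     for q in queries:
--         if q[0]=='?':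
--             rev = q[::-1]
--             left_value = rev.replace('?', 'a')
--             right_value = rev.replace('?', 'z')
--             array = data_div_len_rev[len(rev)]
--         else:
--             left_value = q.replace('?', 'a')
--             right_value = q.replace('?', 'z')
--             array = data_div_len[len(q)]
--         result.append(count_by_range(left_value, right_value, array))
--
--     return result
--
-- def count_by_range(left_value, right_value, array):
--     if array==None:
--         return 0
--     left_index = bisect_left(array, left_value)
--     right_index = bisect_right(array, right_value)
--     return right_index-left_index
-- ===== SOURCE B (Python) =====
-- def solution(words, queries):
--     # Bucket the words (and their reverses) by length once; answer each query by a direct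
--     # counting scan of the one bucket, using the same '?'->'a'/'z' bounds. No sorting, no bisect.
--     fwd = {}
--     rev = {}
--     for w in words:
--         fwd.setdefault(len(w), []).append(w)
--         rev.setdefault(len(w), []).append(w[::-1])
--     result = []
--     for q in queries:
--         if q.startswith('?'):
--             pat = q[::-1]
--             pool = rev.get(len(pat), [])
--         else:
--             pat = q
--             pool = fwd.get(len(pat), [])
--         lo = pat.replace('?', 'a')
--         hi = pat.replace('?', 'z')
--         result.append(sum(1 for w in pool if lo <= w <= hi))
--     return result
-- ===== Notes on version B (the rewrite author's own statement) =====
-- stated objective: simpler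
-- what changed: Replaced the 10001 preallocated length-slot lists, per-slot sorting and bisect_left/bisect_right range searches by length-keyed dict buckets and a direct per-query counting scan of the one bucket with the same '?'->'a'/'z' bounds.
import Mathlib
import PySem

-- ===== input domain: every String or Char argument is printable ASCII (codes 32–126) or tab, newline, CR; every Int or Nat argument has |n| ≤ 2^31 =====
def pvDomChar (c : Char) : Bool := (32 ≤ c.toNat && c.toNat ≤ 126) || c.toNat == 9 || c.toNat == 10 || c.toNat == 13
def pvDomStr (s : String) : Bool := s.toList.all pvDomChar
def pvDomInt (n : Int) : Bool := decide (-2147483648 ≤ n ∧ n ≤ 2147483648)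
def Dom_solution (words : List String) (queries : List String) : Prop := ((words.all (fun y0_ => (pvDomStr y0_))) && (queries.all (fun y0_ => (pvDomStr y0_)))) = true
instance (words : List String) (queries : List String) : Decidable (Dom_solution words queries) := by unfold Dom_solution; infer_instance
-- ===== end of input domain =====

-- B replaces A's 10001 length-bucket lists, per-bucket sorting and bisect range searches by a
-- direct per-query counting scan with the same '?'→'a'/'z' bounds (objective: simpler).

-- ===== PORT A =====
-- count_by_range; the `array == None` guard of the Python is unreachable (every bucket is a list)
-- and has no representation under the type convention, so it is dropped; bisect_left / bisect_right
-- are PySem.List.bisectLeft / bisectRight; strings are handled as their code-point lists throughout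
-- (Python's str comparison is '<' on the toList side, per PYSEM.md).
def countByRange (leftValue rightValue : List Char) (array : List (List Char)) : Int :=
  let leftIndex := PySem.List.bisectLeft array leftValue
  let rightIndex := PySem.List.bisectRight array rightValue
  (rightIndex : Int) - (leftIndex : Int)

-- data_div_len / data_div_len_rev are the literal 10001-slot lists ([[] for _ in range(10001)]
-- is List.replicate 10001 []); data[len(w)].append(w) is List.set at index len(w) (in range on
-- every input Pre_ admits; Python raises IndexError outside it, and those inputs are excluded);
-- w[::-1] / q[::-1] is List.reverse (PySem.List.slice?_none_none_neg_one); the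
-- 'for i in range(10001): data[i].sort()' loop sorts every slot once, in order: each slot i is
-- replaced by PySem.List.sorted of itself, i.e. the table is mapped slotwise through sorted.
def solution (words : List String) (queries : List String) : List Int :=
  let dataDivLen : List (List (List Char)) := List.replicate 10001 []
  let dataDivLenRev : List (List (List Char)) := List.replicate 10001 []
  let p := words.foldl
    (fun s w => (s.1.set w.toList.length (PySem.List.pyGetD s.1 ((w.toList.length : Nat) : Int) [] ++ [w.toList]),
                 s.2.set w.toList.length (PySem.List.pyGetD s.2 ((w.toList.length : Nat) : Int) [] ++ [w.toList.reverse])))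
    (dataDivLen, dataDivLenRev)
  let tables := (p.1.map (fun b => PySem.List.sorted b (fun x => x) false),
                 p.2.map (fun b => PySem.List.sorted b (fun x => x) false))
  queries.foldl
    (fun result q =>
      result ++ [if PySem.List.pyGet? q.toList 0 = some '?' then
          let rev := q.toList.reverse
          let leftValue := PySem.Chars.replace rev ['?'] ['a']
          let rightValue := PySem.Chars.replace rev ['?'] ['z']
          let array := PySem.List.pyGetD tables.2 ((rev.length : Nat) : Int) []
          countByRange leftValue rightValue array
        else
          let leftValue := PySem.Chars.replace q.toList ['?'] ['a']
          let rightValue := PySem.Chars.replace q.toList ['?'] ['z']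
          let array := PySem.List.pyGetD tables.1 ((q.toList.length : Nat) : Int) []
          countByRange leftValue rightValue array])
    []

-- ===== PORT B =====
-- per-query count of the bucket words lying in [lo, hi]
def countMatches (pat : List Char) (pool : List (List Char)) : Int :=
  let lo := PySem.Chars.replace pat ['?'] ['a']
  let hi := PySem.Chars.replace pat ['?'] ['z']
  ((pool.countP (fun w => decide (lo ≤ w) && decide (w ≤ hi)) : Nat) : Int)

-- fwd/rev are dicts keyed by word length (setdefault(len, []).append is Dict.modify with default [])
def solution_alt (words : List String) (queries : List String) : List Int :=
  let buckets := words.foldl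
    (fun s w => (s.1.modify w.toList.length [] (· ++ [w.toList]),
                 s.2.modify w.toList.length [] (· ++ [w.toList.reverse])))
    ((PySem.Dict.empty : PySem.Dict Nat (List (List Char))),
     (PySem.Dict.empty : PySem.Dict Nat (List (List Char))))
  queries.map (fun q =>
    if PySem.Chars.startswith q.toList ['?'] then
      countMatches q.toList.reverse (buckets.2.getD q.toList.reverse.length [])
    else
      countMatches q.toList (buckets.1.getD q.toList.length []))

-- ===== PRECONDITION & SPEC =====
-- Pre_ excludes exactly the inputs where the Python A raises: an empty query string
-- (q[0] IndexError) and any word or query longer than 10000 (IndexError on the 10001-slot lists).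
def Pre_solution (words : List String) (queries : List String) : Prop :=
  (∀ w ∈ words, w.toList.length ≤ 10000) ∧
  (∀ q ∈ queries, q.toList ≠ [] ∧ q.toList.length ≤ 10000)
instance (words : List String) (queries : List String) : Decidable (Pre_solution words queries) := by
  unfold Pre_solution; infer_instance

def pvWitness_solution : List String × List String := (["abcde", "abcxe", "abd"], ["a?c??", "ab???", "????e", "abd"])

def Spec_solution (words : List String) (queries : List String) (out : List Int) : Prop := out = solution_alt words queries
instance (words : List String) (queries : List String) (out : List Int) : Decidable (Spec_solution words queries out) := by unfold Spec_solution; infer_instance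

-- ===== CLAIM (what is proved, stated in full; the proofs are below) =====
def Claim_equal_solution : Prop := ∀ (words : List String) (queries : List String), Dom_solution words queries → Pre_solution words queries → Spec_solution words queries (solution words queries)

-- ===== LEMMAS AND PROOFS =====

-- the binary-search loops of bisect_left/bisect_right, characterised on a sorted list
theorem pv_hmono_of_pairwise (xs : List (List Char))
    (hs : List.Pairwise (· ≤ ·) xs) :
    ∀ (i j : Nat) (hi : i < xs.length) (hj : j < xs.length), i ≤ j → xs[i] ≤ xs[j] := by
  intro i j hi hj hij
  rcases Nat.lt_or_ge i j with h | h
  · exact (List.pairwise_iff_getElem.mp hs) i j hi hj h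
  · have : i = j := by omega
    subst this; exact le_refl _

theorem pv_bisectLeftLoop_inv (xs : List (List Char)) (x : List Char)
    (hmono : ∀ (i j : Nat) (hi : i < xs.length) (hj : j < xs.length), i ≤ j → xs[i] ≤ xs[j]) :
    ∀ (fuel lo hi : Nat), lo ≤ hi → hi ≤ xs.length → hi - lo ≤ fuel →
    (∀ (j : Nat) (hj : j < xs.length), j < lo → xs[j] < x) →
    (∀ (j : Nat) (hj : j < xs.length), hi ≤ j → x ≤ xs[j]) →
    PySem.List.bisectLeftLoop xs x fuel lo hi ≤ xs.length ∧
    (∀ (j : Nat) (hj : j < xs.length), j < PySem.List.bisectLeftLoop xs x fuel lo hi → xs[j] < x) ∧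
    (∀ (j : Nat) (hj : j < xs.length), PySem.List.bisectLeftLoop xs x fuel lo hi ≤ j → x ≤ xs[j]) := by
  intro fuel
  induction fuel with
  | zero =>
    intro lo hi h1 h2 h3 hlow hhigh
    have : lo = hi := by omega
    subst this
    simp only [PySem.List.bisectLeftLoop]
    exact ⟨by omega, hlow, fun j hj hle => hhigh j hj hle⟩
  | succ f ih =>
    intro lo hi h1 h2 h3 hlow hhigh
    by_cases hlh : lo < hi
    · have hmid : (lo + hi) / 2 < xs.length := by omega
      have hget : xs[(lo + hi) / 2]? = some xs[(lo + hi) / 2] := List.getElem?_eq_getElem hmid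
      simp only [PySem.List.bisectLeftLoop, if_pos hlh, hget]
      by_cases hcmp : xs[(lo + hi) / 2] < x
      · simp only [if_pos hcmp]
        exact ih ((lo + hi) / 2 + 1) hi (by omega) h2 (by omega)
          (fun j hj hjlt => lt_of_le_of_lt (hmono j ((lo + hi) / 2) hj hmid (by omega)) hcmp)
          hhigh
      · simp only [if_neg hcmp]
        exact ih lo ((lo + hi) / 2) (by omega) (by omega) (by omega) hlow
          (fun j hj hjle => le_trans (not_lt.mp hcmp) (hmono ((lo + hi) / 2) j hmid hj hjle))
    · have : lo = hi := by omega
      subst this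
      simp only [PySem.List.bisectLeftLoop, if_neg hlh]
      exact ⟨by omega, hlow, fun j hj hle => hhigh j hj hle⟩

theorem pv_bisectRightLoop_inv (xs : List (List Char)) (x : List Char)
    (hmono : ∀ (i j : Nat) (hi : i < xs.length) (hj : j < xs.length), i ≤ j → xs[i] ≤ xs[j]) :
    ∀ (fuel lo hi : Nat), lo ≤ hi → hi ≤ xs.length → hi - lo ≤ fuel →
    (∀ (j : Nat) (hj : j < xs.length), j < lo → xs[j] ≤ x) →
    (∀ (j : Nat) (hj : j < xs.length), hi ≤ j → x < xs[j]) →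
    PySem.List.bisectRightLoop xs x fuel lo hi ≤ xs.length ∧
    (∀ (j : Nat) (hj : j < xs.length), j < PySem.List.bisectRightLoop xs x fuel lo hi → xs[j] ≤ x) ∧
    (∀ (j : Nat) (hj : j < xs.length), PySem.List.bisectRightLoop xs x fuel lo hi ≤ j → x < xs[j]) := by
  intro fuel
  induction fuel with
  | zero =>
    intro lo hi h1 h2 h3 hlow hhigh
    have : lo = hi := by omega
    subst this
    simp only [PySem.List.bisectRightLoop]
    exact ⟨by omega, hlow, fun j hj hle => hhigh j hj hle⟩
  | succ f ih =>
    intro lo hi h1 h2 h3 hlow hhigh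
    by_cases hlh : lo < hi
    · have hmid : (lo + hi) / 2 < xs.length := by omega
      have hget : xs[(lo + hi) / 2]? = some xs[(lo + hi) / 2] := List.getElem?_eq_getElem hmid
      simp only [PySem.List.bisectRightLoop, if_pos hlh, hget]
      by_cases hcmp : x < xs[(lo + hi) / 2]
      · simp only [if_pos hcmp]
        exact ih lo ((lo + hi) / 2) (by omega) (by omega) (by omega) hlow
          (fun j hj hjle => lt_of_lt_of_le hcmp (hmono ((lo + hi) / 2) j hmid hj hjle))
      · simp only [if_neg hcmp]
        exact ih ((lo + hi) / 2 + 1) hi (by omega) h2 (by omega)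
          (fun j hj hjlt => le_trans (hmono j ((lo + hi) / 2) hj hmid (by omega)) (not_lt.mp hcmp))
          hhigh
    · have : lo = hi := by omega
      subst this
      simp only [PySem.List.bisectRightLoop, if_neg hlh]
      exact ⟨by omega, hlow, fun j hj hle => hhigh j hj hle⟩

theorem pv_countP_of_split {α : Type} (xs : List α) (p : α → Bool) (r : Nat) (hr : r ≤ xs.length)
    (h1 : ∀ (j : Nat) (hj : j < xs.length), j < r → p xs[j])
    (h2 : ∀ (j : Nat) (hj : j < xs.length), r ≤ j → ¬ p xs[j]) :
    xs.countP p = r := by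
  have hsplit : xs = xs.take r ++ xs.drop r := (List.take_append_drop r xs).symm
  rw [hsplit, List.countP_append]
  have htake : (xs.take r).countP p = (xs.take r).length := by
    rw [List.countP_eq_length]
    intro a ha
    obtain ⟨i, hi, hei⟩ := List.mem_iff_getElem.mp ha
    have hil : i < xs.length := by
      have := List.length_take (l := xs) (i := r); omega
    rw [List.getElem_take] at hei
    subst hei
    exact h1 i hil (by have := List.length_take (l := xs) (i := r); omega)
  have hdrop : (xs.drop r).countP p = 0 := by
    rw [List.countP_eq_zero]
    intro a ha
    obtain ⟨i, hi, hei⟩ := List.mem_iff_getElem.mp ha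
    rw [List.getElem_drop] at hei
    subst hei
    have hi' : i < xs.length - r := by simpa using hi
    exact h2 (r + i) (by omega) (by omega)
  rw [htake, hdrop, List.length_take]
  omega

theorem pv_bisectLeft_eq_countP (xs : List (List Char)) (x : List Char)
    (hs : List.Pairwise (· ≤ ·) xs) :
    PySem.List.bisectLeft xs x = xs.countP (fun w => decide (w < x)) := by
  obtain ⟨ha, hb, hc⟩ := pv_bisectLeftLoop_inv xs x (pv_hmono_of_pairwise xs hs)
    xs.length 0 xs.length (by omega) le_rfl (by omega) (by omega) (by omega)
  exact (pv_countP_of_split xs _ _ ha (fun j hj hjr => by simpa using hb j hj hjr)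
    (fun j hj hjr => by simpa using hc j hj hjr)).symm

theorem pv_bisectRight_eq_countP (xs : List (List Char)) (x : List Char)
    (hs : List.Pairwise (· ≤ ·) xs) :
    PySem.List.bisectRight xs x = xs.countP (fun w => decide (w ≤ x)) := by
  obtain ⟨ha, hb, hc⟩ := pv_bisectRightLoop_inv xs x (pv_hmono_of_pairwise xs hs)
    xs.length 0 xs.length (by omega) le_rfl (by omega) (by omega) (by omega)
  exact (pv_countP_of_split xs _ _ ha (fun j hj hjr => by simpa using hb j hj hjr)
    (fun j hj hjr => by simpa [not_le] using hc j hj hjr)).symm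

theorem pv_countP_range_split (l : List (List Char)) (lo hi : List Char) (h : lo ≤ hi) :
    l.countP (fun w => decide (w ≤ hi))
      = l.countP (fun w => decide (lo ≤ w) && decide (w ≤ hi)) + l.countP (fun w => decide (w < lo)) := by
  induction l with
  | nil => simp
  | cons a t ih =>
    simp only [List.countP_cons]
    rw [ih]
    by_cases h1 : lo ≤ a <;> by_cases h2 : a ≤ hi
    · simp [h1, h2, not_lt.mpr h1]; omega
    · simp [h1, h2, not_lt.mpr h1]
    · have ha : a < lo := not_le.mp h1
      simp [h1, h2, ha]; omega
    · exact absurd (le_of_lt (lt_of_lt_of_le (not_le.mp h1) h)) h2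

-- replace with a one-character pattern is a map
theorem pv_replace_go_single (o n : Char) :
    ∀ (fuel : Nat) (l acc : List Char), l.length ≤ fuel →
    PySem.Chars.replace.go [o] [n] fuel l acc
      = acc.reverse ++ l.map (fun c => if c = o then n else c) := by
  intro fuel
  induction fuel with
  | zero =>
    intro l acc hl
    have : l = [] := List.length_eq_zero_iff.mp (by omega)
    subst this
    simp [PySem.Chars.replace.go]
  | succ f ih =>
    intro l acc hl
    cases l with
    | nil => simp [PySem.Chars.replace.go]
    | cons c t =>
      by_cases hc : c = o
      · have hpre : List.isPrefixOf [o] (c :: t) = true := by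
          simp [List.isPrefixOf, hc]
        simp only [PySem.Chars.replace.go, hpre, if_pos]
        rw [ih _ _ (by simpa using Nat.le_of_succ_le_succ (by simpa using hl))]
        simp [hc]
      · have hpre : List.isPrefixOf [o] (c :: t) = false := by
          simp [List.isPrefixOf]; exact fun h => absurd h.symm hc
        simp only [PySem.Chars.replace.go, hpre]
        rw [if_neg (by simp)]
        rw [ih _ _ (by simpa using hl)]
        simp [hc]

theorem pv_replace_single (o n : Char) (l : List Char) :
    PySem.Chars.replace l [o] [n] = l.map (fun c => if c = o then n else c) := by
  simp only [PySem.Chars.replace]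
  rw [if_neg (by simp)]
  rw [pv_replace_go_single o n l.length l [] le_rfl]
  simp

theorem pv_map_le_map (l : List Char) (f g : Char → Char) (h : ∀ c, f c ≤ g c) :
    l.map f ≤ l.map g := by
  induction l with
  | nil => exact le_refl _
  | cons c t ih =>
    rcases lt_or_eq_of_le (h c) with hc | hc
    · exact le_of_lt (List.Lex.rel hc)
    · rcases lt_or_eq_of_le ih with ht | ht
      · refine le_of_lt ?_
        show List.Lex (· < ·) (f c :: List.map f t) (g c :: List.map g t)
        rw [hc]
        exact List.Lex.cons ht
      · simp only [List.map_cons, hc, ht]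
        exact le_refl _

theorem pv_replace_a_le_z (pat : List Char) :
    PySem.Chars.replace pat ['?'] ['a'] ≤ PySem.Chars.replace pat ['?'] ['z'] := by
  rw [pv_replace_single, pv_replace_single]
  apply pv_map_le_map
  intro c
  by_cases hc : c = '?' <;> simp [hc]

-- PySem.List.sorted does not depend on which (equivalent) DecidableLT instance is used
theorem pv_sorted_inst_eq {α κ : Type} {i1 i2 : LT κ} {d1 : @DecidableLT κ i1} {d2 : @DecidableLT κ i2}
    (h : ∀ a b : κ, (@LT.lt κ i1 a b) ↔ (@LT.lt κ i2 a b)) (xs : List α) (key : α → κ) :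
    @PySem.List.sorted α κ i1 d1 xs key false = @PySem.List.sorted α κ i2 d2 xs key false := by
  rw [@PySem.List.sorted_eq_foldl_insertBy α κ i1 d1 xs key,
      @PySem.List.sorted_eq_foldl_insertBy α κ i2 d2 xs key]
  have hcmp : (fun a b : α => @decide (@LT.lt κ i1 (key a) (key b)) (d1 (key a) (key b)))
      = (fun a b : α => @decide (@LT.lt κ i2 (key a) (key b)) (d2 (key a) (key b))) := by
    funext a b
    exact decide_eq_decide.mpr (h _ _)
  rw [hcmp]

theorem pv_sorted_pairwise_core (bucket : List (List Char)) :
    List.Pairwise (· ≤ ·) (PySem.List.sorted bucket (fun x => x) false) := by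
  have hpair := PySem.List.sorted_pairwise bucket (fun x => x)
  have hb := pv_sorted_inst_eq (α := List Char) (κ := List Char)
      (i1 := List.instLT) (d1 := fun a b => List.decidableLT a b)
      (i2 := List.instLinearOrder.toLT) (d2 := @LinearOrder.toDecidableLT (List Char) (List.instLinearOrder))
      (fun a b => Iff.rfl) bucket (fun x => x)
  rw [← hb] at hpair
  exact hpair.imp (fun hab => hab)

theorem pv_key_lemma (pat : List Char) (bucket : List (List Char)) :
    countByRange (PySem.Chars.replace pat ['?'] ['a']) (PySem.Chars.replace pat ['?'] ['z'])
      (PySem.List.sorted bucket (fun x => x) false)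
    = countMatches pat bucket := by
  set lo := PySem.Chars.replace pat ['?'] ['a'] with hlo
  set hi := PySem.Chars.replace pat ['?'] ['z'] with hhi
  set sb := PySem.List.sorted bucket (fun x => x) false with hsb
  have hp : List.Pairwise (· ≤ ·) sb := pv_sorted_pairwise_core bucket
  have hperm : sb.Perm bucket := PySem.List.sorted_perm bucket (fun x => x) false
  show (PySem.List.bisectRight sb hi : Int) - (PySem.List.bisectLeft sb lo : Int) = _
  rw [pv_bisectRight_eq_countP sb hi hp, pv_bisectLeft_eq_countP sb lo hp]
  rw [hperm.countP_eq, hperm.countP_eq]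
  rw [pv_countP_range_split bucket lo hi (pv_replace_a_le_z pat)]
  show _ = ((bucket.countP (fun w => decide (lo ≤ w) && decide (w ≤ hi)) : Nat) : Int)
  omega

-- the bucket-building loop, read back at one slot
theorem pv_build_length (ws : List String) (key : String → Nat) (val : String → List Char) :
    ∀ (acc : List (List (List Char))),
    (ws.foldl (fun a w => a.set (key w) (PySem.List.pyGetD a ((key w : Nat) : Int) [] ++ [val w])) acc).length
      = acc.length := by
  induction ws with
  | nil => intro acc; rfl
  | cons w t ih =>
    intro acc
    rw [List.foldl_cons, ih]
    exact List.length_set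

theorem pv_build_getD (ws : List String) (key : String → Nat) (val : String → List Char) :
    ∀ (acc : List (List (List Char))) (L : Nat), L < acc.length → (∀ w ∈ ws, key w < acc.length) →
    (ws.foldl (fun a w => a.set (key w) (PySem.List.pyGetD a ((key w : Nat) : Int) [] ++ [val w])) acc).getD L []
      = acc.getD L [] ++ (ws.filter (fun w => key w == L)).map val := by
  induction ws with
  | nil => intro acc L hL hk; simp
  | cons w t ih =>
    intro acc L hL hk
    rw [List.foldl_cons]
    have hkw : key w < acc.length := hk w (List.mem_cons_self)
    have hacc' : (acc.set (key w) (PySem.List.pyGetD acc ((key w : Nat) : Int) [] ++ [val w])).length = acc.length :=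
      List.length_set
    rw [ih _ L (by omega) (fun v hv => by rw [hacc']; exact hk v (List.mem_cons_of_mem _ hv))]
    rw [PySem.List.pyGetD_natCast]
    by_cases he : key w = L
    · subst he
      rw [List.filter_cons_of_pos (by simp)]
      rw [List.getD_eq_getElem?_getD, List.getElem?_set, if_pos rfl, if_pos hkw]
      rw [List.getD_eq_getElem?_getD]
      simp
    · rw [List.filter_cons_of_neg (by simp [he])]
      rw [List.getD_eq_getElem?_getD, List.getElem?_set, if_neg he, ← List.getD_eq_getElem?_getD]

-- the sorted table, looked up at one slot, is the sorted filtered pool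
theorem pv_table_lookup (ws : List String) (val : String → List Char)
    (L : Nat) (hL : L < 10001)
    (hws : ∀ w ∈ ws, w.toList.length < 10001) :
    PySem.List.pyGetD
      ((ws.foldl (fun a w => a.set w.toList.length (PySem.List.pyGetD a ((w.toList.length : Nat) : Int) [] ++ [val w]))
          (List.replicate 10001 ([] : List (List Char)))).map
        (fun b => PySem.List.sorted b (fun x => x) false))
      ((L : Nat) : Int) []
    = PySem.List.sorted ((ws.filter (fun w => w.toList.length == L)).map val) (fun x => x) false := by
  rw [PySem.List.pyGetD_natCast]
  set F := ws.foldl (fun a w => a.set w.toList.length (PySem.List.pyGetD a ((w.toList.length : Nat) : Int) [] ++ [val w]))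
      (List.replicate 10001 ([] : List (List Char))) with hF
  have hFlen : F.length = 10001 := by
    rw [hF, pv_build_length ws (fun w => w.toList.length) val, List.length_replicate]
  have hFL : F.getD L [] = (ws.filter (fun w => w.toList.length == L)).map val := by
    rw [hF, pv_build_getD ws (fun w => w.toList.length) val _ L
      (by rw [List.length_replicate]; omega) (fun w hw => by rw [List.length_replicate]; exact hws w hw)]
    rw [List.getD_eq_getElem?_getD, List.getElem?_replicate, if_pos hL]
    rfl
  rw [List.getD_eq_getElem?_getD, List.getElem?_map]
  rw [List.getElem?_eq_getElem (by omega)]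
  simp only [Option.map_some, Option.getD_some]
  have hFe : F[L]'(by omega) = F.getD L [] := by
    rw [List.getD_eq_getElem?_getD, List.getElem?_eq_getElem (by omega)]
    rfl
  rw [hFe, hFL]

-- B's dict buckets, read back at one key
theorem pv_dict_getD (ws : List String) (key : String → Nat) (val : String → List Char) (L : Nat) :
    ((ws.foldl (fun d w => d.modify (key w) [] (· ++ [val w])) (PySem.Dict.empty : PySem.Dict Nat (List (List Char)))).getD L [])
    = ((ws.filter (fun w => key w == L)).map val) := by
  have hfold : ws.foldl (fun d w => d.modify (key w) [] (· ++ [val w])) (PySem.Dict.empty : PySem.Dict Nat (List (List Char)))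
      = (ws.map (fun w => (key w, val w))).foldl (fun d p => d.modify p.1 [] (· ++ [p.2])) PySem.Dict.empty := by
    rw [List.foldl_map]
  rw [hfold, PySem.Dict.getD_foldl_modify_append]
  simp [List.filter_map, Function.comp_def]

theorem pv_head_iff (cs : List Char) (h : cs ≠ []) :
    (PySem.List.pyGet? cs 0 = some '?') ↔ PySem.Chars.startswith cs ['?'] = true := by
  cases cs with
  | nil => exact absurd rfl h
  | cons c t =>
    constructor
    · intro hg
      have : c = '?' := by simpa [PySem.List.pyGet?, PySem.List.pyIdx?] using hg
      subst this
      simp [PySem.Chars.startswith_iff, List.cons_prefix_cons]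
    · intro hs
      have : c = '?' := by
        have := (PySem.Chars.startswith_iff _ _).mp hs
        rcases List.cons_prefix_cons.mp this with ⟨he, _⟩
        exact he.symm
      subst this
      simp [PySem.List.pyGet?, PySem.List.pyIdx?]

theorem pv_main (words : List String) (queries : List String) (hpre : Pre_solution words queries) :
    solution words queries = solution_alt words queries := by
  obtain ⟨hw, hq⟩ := hpre
  have hws : ∀ w ∈ words, w.toList.length < 10001 := fun w h => by have := hw w h; omega
  simp only [solution, solution_alt]
  have hb := PySem.List.foldl_prod_mk
    (f := fun a w => a.set w.toList.length (PySem.List.pyGetD a ((w.toList.length : Nat) : Int) [] ++ [w.toList]))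
    (g := fun a w => a.set w.toList.length (PySem.List.pyGetD a ((w.toList.length : Nat) : Int) [] ++ [w.toList.reverse]))
    (l := words)
    (a := (List.replicate 10001 ([] : List (List Char))))
    (b := (List.replicate 10001 ([] : List (List Char))))
  rw [hb]
  have hd := PySem.List.foldl_prod_mk
    (f := fun d w => d.modify w.toList.length [] (· ++ [w.toList]))
    (g := fun d w => d.modify w.toList.length [] (· ++ [w.toList.reverse]))
    (l := words)
    (a := (PySem.Dict.empty : PySem.Dict Nat (List (List Char))))
    (b := (PySem.Dict.empty : PySem.Dict Nat (List (List Char))))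
  rw [hd]
  rw [PySem.List.foldl_append_singleton_eq_map]
  rw [List.nil_append]
  apply List.map_congr_left
  intro q hq'
  obtain ⟨hne, hlen⟩ := hq q hq'
  by_cases hcond : PySem.List.pyGet? q.toList 0 = some '?'
  · rw [if_pos hcond, if_pos ((pv_head_iff q.toList hne).mp hcond)]
    have e1 := pv_table_lookup words (fun w => w.toList.reverse)
      q.toList.reverse.length
      (by have h1 : q.toList.reverse.length = q.toList.length := List.length_reverse; omega)
      hws
    have e2 := pv_dict_getD words (fun w => w.toList.length) (fun w => w.toList.reverse)
      q.toList.reverse.length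
    rw [e1, e2]
    exact pv_key_lemma q.toList.reverse _
  · rw [if_neg hcond, if_neg (by
      intro hs
      exact hcond ((pv_head_iff q.toList hne).mpr hs))]
    have e1 := pv_table_lookup words (fun w => w.toList)
      q.toList.length (by omega) hws
    have e2 := pv_dict_getD words (fun w => w.toList.length) (fun w => w.toList)
      q.toList.length
    rw [e1, e2]
    exact pv_key_lemma q.toList _

-- ===== VERDICT (by name: the statement is the Claim_ definition above) =====
theorem solution_spec : Claim_equal_solution := by
  intro words queries _ hpre
  unfold Spec_solution
  exact pv_main words queries hpre
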